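-- pv_equiv track=rewrite | github.com/Panda4817/advent-of-code-2022 | year2018/25/25.py | recurse_through_stars
-- ===== SOURCE A (Python) =====
-- def is_mh_three_or_less(a, b):
--     mh = abs(a[0] - b[0]) + abs(a[1] - b[1]) + abs(a[2] - b[2]) + abs(a[3] - b[3])
--     if mh <= 3:
--         return True
--
--     return False
--
-- def recurse_through_stars(current_set, first, all_stars, done):
--     for star in all_stars:
--         if star in done:
--             continue
--
--         if is_mh_three_or_less(first, star):
--             current_set.add(star)
--             done.add(star)
--             current_set, done = recurse_through_stars(
--                 current_set, star, all_stars, done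
--             )
--
--     return current_set, done
-- ===== SOURCE B (Python) =====
-- def recurse_through_stars(current_set, first, all_stars, done):
--     # Iterative DFS: explicit stack of (node, index) frames replaces A's recursion.
--     n = len(all_stars)
--     stack = [(first, 0)]
--     while stack:
--         node, i = stack.pop()
--         if i < n:
--             star = all_stars[i]
--             if star not in done and (abs(node[0] - star[0]) + abs(node[1] - star[1])
--                                      + abs(node[2] - star[2]) + abs(node[3] - star[3])) <= 3:
--                 current_set.add(star)
--                 done.add(star)
--                 stack.append((node, i + 1))
--                 stack.append((star, 0))
--             else:
--                 stack.append((node, i + 1))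
--     return current_set, done
-- ===== Notes on version B (the rewrite author's own statement) =====
-- stated objective: alternative
-- what changed: Replaced A's recursive DFS (a recursive call per newly found star) by an iterative DFS driven by an explicit stack of (node, index) frames, which also avoids Python's recursion-depth limit on long chains.
import Mathlib
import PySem

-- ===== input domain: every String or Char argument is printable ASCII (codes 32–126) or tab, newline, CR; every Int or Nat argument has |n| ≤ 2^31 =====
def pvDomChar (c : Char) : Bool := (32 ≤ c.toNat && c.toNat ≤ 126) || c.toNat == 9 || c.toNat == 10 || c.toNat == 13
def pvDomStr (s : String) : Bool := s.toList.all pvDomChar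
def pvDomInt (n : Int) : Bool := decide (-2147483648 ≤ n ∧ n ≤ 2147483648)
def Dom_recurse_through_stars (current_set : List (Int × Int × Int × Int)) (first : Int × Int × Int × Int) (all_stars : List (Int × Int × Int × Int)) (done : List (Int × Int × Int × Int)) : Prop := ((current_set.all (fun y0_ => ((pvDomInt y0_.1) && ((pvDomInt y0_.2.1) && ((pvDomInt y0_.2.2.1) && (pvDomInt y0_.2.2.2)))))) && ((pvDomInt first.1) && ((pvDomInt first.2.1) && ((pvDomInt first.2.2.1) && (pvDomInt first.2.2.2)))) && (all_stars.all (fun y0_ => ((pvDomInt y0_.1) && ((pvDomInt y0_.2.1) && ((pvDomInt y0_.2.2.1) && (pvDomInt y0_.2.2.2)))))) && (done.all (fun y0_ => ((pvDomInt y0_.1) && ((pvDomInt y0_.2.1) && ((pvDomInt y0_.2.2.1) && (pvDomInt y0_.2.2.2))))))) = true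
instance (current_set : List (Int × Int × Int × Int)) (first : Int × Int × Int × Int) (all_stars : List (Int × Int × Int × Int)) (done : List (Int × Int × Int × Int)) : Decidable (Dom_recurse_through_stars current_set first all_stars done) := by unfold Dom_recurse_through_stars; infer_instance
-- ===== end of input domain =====

-- B replaces A's recursion by an explicit (node, index) stack — an iterative DFS with the same
-- visiting order; equivalence is about the returned pair (both Pythons mutate the passed-in sets
-- identically in place).

-- ===== PORT A =====
-- helper is_mh_three_or_less, literal
def pvMh3 (a b : Int × Int × Int × Int) : Bool :=
  if |a.1 - b.1| + |a.2.1 - b.2.1| + |a.2.2.1 - b.2.2.1| + |a.2.2.2 - b.2.2.2| ≤ 3 then true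
  else false

-- the `for star in all_stars` loop of A; `goRec` is the recursive call on a newly found star
def pvLoopA
    (goRec : (Int × Int × Int × Int) → List (Int × Int × Int × Int) →
      List (Int × Int × Int × Int) → (List (Int × Int × Int × Int)) × (List (Int × Int × Int × Int)))
    (first : Int × Int × Int × Int) :
    List (Int × Int × Int × Int) → List (Int × Int × Int × Int) → List (Int × Int × Int × Int) →
      (List (Int × Int × Int × Int)) × (List (Int × Int × Int × Int))
  | [], cs, done => (cs, done)
  | star :: rest, cs, done =>
    if PySem.Set.contains done star then pvLoopA goRec first rest cs done
    else if pvMh3 first star then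
      let r := goRec star (PySem.Set.add cs star) (PySem.Set.add done star)
      pvLoopA goRec first rest r.1 r.2
    else pvLoopA goRec first rest cs done

-- recurse_through_stars, literal; `fuel` only bounds the recursion depth (each recursive call
-- adds a star of all_stars to done first, so depth ≤ all_stars.length + 1 and the top-level
-- fuel below is never exhausted — proved by the equivalence theorem’s helper lemmas)
def pvGoAF : Nat → List (Int × Int × Int × Int) → (Int × Int × Int × Int) →
    List (Int × Int × Int × Int) → List (Int × Int × Int × Int) →
    (List (Int × Int × Int × Int)) × (List (Int × Int × Int × Int))
  | 0, _, _, cs, done => (cs, done)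
  | f + 1, all, first, cs, done => pvLoopA (pvGoAF f all) first all cs done

def recurse_through_stars (current_set : List (Int × Int × Int × Int)) (first : Int × Int × Int × Int) (all_stars : List (Int × Int × Int × Int)) (done : List (Int × Int × Int × Int)) : (List (Int × Int × Int × Int)) × (List (Int × Int × Int × Int)) :=
  pvGoAF (all_stars.length + 1) all_stars first current_set done

-- ===== PORT B =====
-- the while loop of Source B: pop a (node, i) frame, inspect all_stars[i], push successor frames;
-- `fuel` only bounds the number of loop iterations (each iteration strictly decreases a
-- measure bounded by the top-level fuel below — proved by the equivalence theorem’s helpers)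
def pvRunBF : Nat → List (Int × Int × Int × Int) → List ((Int × Int × Int × Int) × Nat) →
    List (Int × Int × Int × Int) → List (Int × Int × Int × Int) →
    (List (Int × Int × Int × Int)) × (List (Int × Int × Int × Int))
  | 0, _, _, cs, done => (cs, done)
  | _ + 1, _, [], cs, done => (cs, done)
  | f + 1, all, (node, i) :: rest, cs, done =>
    if h : i < all.length then
      if !(PySem.Set.contains done all[i]) && pvMh3 node all[i] then
        pvRunBF f all ((all[i], 0) :: (node, i + 1) :: rest)
          (PySem.Set.add cs all[i]) (PySem.Set.add done all[i])
      else
        pvRunBF f all ((node, i + 1) :: rest) cs done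
    else pvRunBF f all rest cs done

def recurse_through_stars_alt (current_set : List (Int × Int × Int × Int)) (first : Int × Int × Int × Int) (all_stars : List (Int × Int × Int × Int)) (done : List (Int × Int × Int × Int)) : (List (Int × Int × Int × Int)) × (List (Int × Int × Int × Int)) :=
  pvRunBF ((all_stars.length + 1) * (all_stars.length + 3)) all_stars [(first, 0)] current_set done

-- ===== PRECONDITION & SPEC =====
def Spec_recurse_through_stars (current_set : List (Int × Int × Int × Int)) (first : Int × Int × Int × Int) (all_stars : List (Int × Int × Int × Int)) (done : List (Int × Int × Int × Int)) (out : (List (Int × Int × Int × Int)) × (List (Int × Int × Int × Int))) : Prop := out = recurse_through_stars_alt current_set first all_stars done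
instance (current_set : List (Int × Int × Int × Int)) (first : Int × Int × Int × Int) (all_stars : List (Int × Int × Int × Int)) (done : List (Int × Int × Int × Int)) (out : (List (Int × Int × Int × Int)) × (List (Int × Int × Int × Int))) : Decidable (Spec_recurse_through_stars current_set first all_stars done out) := by unfold Spec_recurse_through_stars; infer_instance

-- ===== CLAIM (what is proved, stated in full; the proofs are below) =====
def Claim_equal_recurse_through_stars : Prop := ∀ (current_set : List (Int × Int × Int × Int)) (first : Int × Int × Int × Int) (all_stars : List (Int × Int × Int × Int)) (done : List (Int × Int × Int × Int)), Dom_recurse_through_stars current_set first all_stars done → Spec_recurse_through_stars current_set first all_stars done (recurse_through_stars current_set first all_stars done)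

-- ===== LEMMAS AND PROOFS =====

-- number of stars of `all` not yet in `done` (termination measure only, not part of the ports' results)
def pvCnt (all done : List (Int × Int × Int × Int)) : Nat :=
  (all.filter (fun s => !(PySem.Set.contains done s))).length

lemma pvCnt_mono (all done done' : List (Int × Int × Int × Int))
    (h : ∀ x ∈ done, x ∈ done') : pvCnt all done' ≤ pvCnt all done := by
  unfold pvCnt
  rw [← List.countP_eq_length_filter, ← List.countP_eq_length_filter]
  apply List.countP_mono_left
  intro a _ hp
  simp only [PySem.Set.contains, Bool.not_eq_true', ← Bool.not_eq_true] at hp ⊢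
  intro hmem
  exact hp (by simpa [List.contains_iff_mem] using h a (by simpa [List.contains_iff_mem] using hmem))

lemma pvCnt_add_lt (all done : List (Int × Int × Int × Int)) (star : Int × Int × Int × Int)
    (hmem : star ∈ all) (hnc : star ∉ done) :
    pvCnt all (PySem.Set.add done star) < pvCnt all done := by
  have hadd : PySem.Set.add done star = done ++ [star] := by
    simp [PySem.Set.add, PySem.Set.contains, hnc]
  unfold pvCnt
  rw [hadd, ← List.countP_eq_length_filter, ← List.countP_eq_length_filter]
  have hmono : ∀ x : Int × Int × Int × Int,
      (!(PySem.Set.contains (done ++ [star]) x)) = true →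
      (!(PySem.Set.contains done x)) = true := by
    intro x hx
    simp only [Bool.not_eq_true'] at hx ⊢
    cases h : PySem.Set.contains done x with
    | false => rfl
    | true =>
      have hxmem : x ∈ done := List.contains_iff_mem.mp h
      have hc2 : PySem.Set.contains (done ++ [star]) x = true :=
        List.contains_iff_mem.mpr (List.mem_append_left _ hxmem)
      rw [hc2] at hx
      cases hx
  induction all with
  | nil => cases hmem
  | cons a tl ih =>
    rw [List.countP_cons, List.countP_cons]
    have hle := List.countP_mono_left
      (p := fun s => !(PySem.Set.contains (done ++ [star]) s))
      (q := fun s => !(PySem.Set.contains done s)) (l := tl)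
      (fun x _ hx => hmono x hx)
    rcases List.mem_cons.mp hmem with heq | htl
    · have h1 : (!(PySem.Set.contains (done ++ [star]) a)) = false := by
        rw [← heq]
        simp [PySem.Set.contains]
      have h2 : (!(PySem.Set.contains done a)) = true := by
        rw [← heq]
        simp [PySem.Set.contains, hnc]
      rw [h1, h2]
      simp only [if_true, if_false, Bool.false_eq_true]
      omega
    · have hlt := ih htl
      have hhead : (if (!(PySem.Set.contains (done ++ [star]) a)) = true then 1 else 0) ≤
          (if (!(PySem.Set.contains done a)) = true then 1 else 0) := by
        by_cases hx : (!(PySem.Set.contains (done ++ [star]) a)) = true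
        · rw [if_pos hx, if_pos (hmono a hx)]
        · rw [if_neg hx]
          omega
      omega

-- arithmetic facts for the termination measures (kept as named theorems so the
-- function bodies stay small)
theorem pvDecA1 (c L i : Nat) (h : i < L) :
    c * (L + 2) + (L - (i + 1)) < c * (L + 2) + (L - i) := by omega
theorem pvDecA2 (c' c L i : Nat) (h : c' < c) (hi : i < L) :
    c' * (L + 2) + (L - 0) < c * (L + 2) + (L - i) := by
  have hK := Nat.mul_le_mul_right (L + 2) (Nat.succ_le_of_lt h)
  rw [Nat.succ_mul] at hK
  omega
theorem pvDecA3 (c' c L i : Nat) (h : c' < c) (hi : i < L) :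
    c' * (L + 2) + (L - (i + 1)) < c * (L + 2) + (L - i) := by
  have hK := Nat.mul_le_mul_right (L + 2) (Nat.succ_le_of_lt h)
  rw [Nat.succ_mul] at hK
  omega
theorem pvDecB1 (c' c L i W : Nat) (h : c' < c) (hi : i < L) :
    c' * (L + 2) + ((L + 1 - min 0 L) + ((L + 1 - min (i + 1) L) + W))
      < c * (L + 2) + ((L + 1 - min i L) + W) := by
  have hK := Nat.mul_le_mul_right (L + 2) (Nat.succ_le_of_lt h)
  rw [Nat.succ_mul] at hK
  omega
theorem pvDecB2 (c L i W : Nat) (hi : i < L) :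
    c * (L + 2) + ((L + 1 - min (i + 1) L) + W)
      < c * (L + 2) + ((L + 1 - min i L) + W) := by omega
theorem pvDecB3 (c L i W : Nat) :
    c * (L + 2) + W < c * (L + 2) + ((L + 1 - min i L) + W) := by omega

-- recurse_through_stars, literal: the for-loop from index i, with the recursive call in place;
-- the returned pair is packaged with the proof "done only grows" needed for termination.
def pvGoW (all : List (Int × Int × Int × Int)) (first : Int × Int × Int × Int) (i : Nat)
    (cs done : List (Int × Int × Int × Int)) :
    {p : (List (Int × Int × Int × Int)) × (List (Int × Int × Int × Int)) // ∀ x ∈ done, x ∈ p.2} :=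
  if h : i < all.length then
    if hc : PySem.Set.contains done all[i] then
      pvGoW all first (i + 1) cs done        -- continue
    else if hm : pvMh3 first all[i] then
      match pvGoW all all[i] 0 (PySem.Set.add cs all[i]) (PySem.Set.add done all[i]) with
      | ⟨p, hp⟩ =>
        match pvGoW all first (i + 1) p.1 p.2 with
        | ⟨q, hq⟩ =>
          ⟨q, fun x hx => hq x (hp x ((PySem.Set.mem_add done all[i] x).mpr (Or.inl hx)))⟩
    else
      pvGoW all first (i + 1) cs done
  else ⟨(cs, done), fun _ hx => hx⟩
termination_by pvCnt all done * (all.length + 2) + (all.length - i)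
decreasing_by
  · exact pvDecA1 (pvCnt all done) all.length i h
  · exact pvDecA2 (pvCnt all (PySem.Set.add done all[i])) (pvCnt all done) all.length i
      (pvCnt_add_lt all done all[i] (List.getElem_mem h)
        (by simpa [PySem.Set.contains, List.contains_iff_mem] using hc)) h
  · exact pvDecA3 (pvCnt all p.2) (pvCnt all done) all.length i
      (Nat.lt_of_le_of_lt (pvCnt_mono all (PySem.Set.add done all[i]) p.2 hp)
        (pvCnt_add_lt all done all[i] (List.getElem_mem h)
          (by simpa [PySem.Set.contains, List.contains_iff_mem] using hc))) h
  · exact pvDecA1 (pvCnt all done) all.length i h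

-- weight of a stack frame / of the stack (termination measure only)
def pvFrameW (L : Nat) (f : (Int × Int × Int × Int) × Nat) : Nat := L + 1 - min f.2 L
def pvStackW (L : Nat) (st : List ((Int × Int × Int × Int) × Nat)) : Nat :=
  (st.map (pvFrameW L)).sum

-- the while loop of Source B: pop a (node, i) frame, inspect all_stars[i], push successor frames
def pvRunW (all : List (Int × Int × Int × Int)) (stack : List ((Int × Int × Int × Int) × Nat))
    (cs done : List (Int × Int × Int × Int)) :
    (List (Int × Int × Int × Int)) × (List (Int × Int × Int × Int)) :=
  match stack with
  | [] => (cs, done)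
  | (node, i) :: rest =>
    if h : i < all.length then
      if hc : !(PySem.Set.contains done all[i]) && pvMh3 node all[i] then
        pvRunW all ((all[i], 0) :: (node, i + 1) :: rest)
          (PySem.Set.add cs all[i]) (PySem.Set.add done all[i])
      else
        pvRunW all ((node, i + 1) :: rest) cs done
    else pvRunW all rest cs done
termination_by pvCnt all done * (all.length + 2) + pvStackW all.length stack
decreasing_by
  · exact pvDecB1 (pvCnt all (PySem.Set.add done all[i])) (pvCnt all done) all.length i
      (pvStackW all.length rest)
      (pvCnt_add_lt all done all[i] (List.getElem_mem h)
        (by simpa [PySem.Set.contains, List.contains_iff_mem] using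
          ((Bool.and_eq_true _ _).mp hc).1)) h
  · exact pvDecB2 (pvCnt all done) all.length i (pvStackW all.length rest) h
  · exact pvDecB3 (pvCnt all done) all.length i (pvStackW all.length rest)
-- the stack machine run on (first, i) :: rest first computes A's recursive traversal from index i,
-- then continues with the remaining stack
lemma pvRunW_goW : ∀ (n : Nat) (all : List (Int × Int × Int × Int))
    (first : Int × Int × Int × Int) (i : Nat) (cs done : List (Int × Int × Int × Int))
    (rest : List ((Int × Int × Int × Int) × Nat)),
    pvCnt all done * (all.length + 2) + pvStackW all.length ((first, i) :: rest) ≤ n →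
    pvRunW all ((first, i) :: rest) cs done
      = pvRunW all rest (pvGoW all first i cs done).val.1 (pvGoW all first i cs done).val.2 := by
  intro n
  induction n using Nat.strong_induction_on with
  | _ n ih =>
    intro all first i cs done rest hle
    by_cases h : i < all.length
    · by_cases hc : PySem.Set.contains done all[i]
      · -- star already done: both advance to i+1
        have hcond : (!(PySem.Set.contains done all[i]) && pvMh3 first all[i]) = false := by
          rw [hc]; rfl
        rw [pvRunW, dif_pos h, dif_neg (by rw [hcond]; simp), pvGoW, dif_pos h, dif_pos hc]
        apply ih _ _ all first (i + 1) cs done rest (le_refl _)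
        simp only [pvStackW, pvFrameW, List.map_cons, List.sum_cons] at hle ⊢
        omega
      · by_cases hm : pvMh3 first all[i]
        · -- new star found
          have hnc : all[i] ∉ done := by
            simpa [PySem.Set.contains, List.contains_iff_mem] using hc
          have hcntlt := pvCnt_add_lt all done all[i] (List.getElem_mem h) hnc
          have hc' : PySem.Set.contains done all[i] = false := by simpa using hc
          have hcond : (!(PySem.Set.contains done all[i]) && pvMh3 first all[i]) = true := by
            rw [hc', hm]; rfl
          rw [pvRunW, dif_pos h, dif_pos hcond, pvGoW, dif_pos h, dif_neg hc, dif_pos hm]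
          have hK := Nat.mul_le_mul_right (all.length + 2) (Nat.succ_le_of_lt hcntlt)
          rw [Nat.succ_mul] at hK
          -- first IH application: run the pushed (all[i], 0) frame
          rw [ih _ (by
                simp only [pvStackW, pvFrameW, List.map_cons, List.sum_cons] at hle ⊢
                omega)
              all all[i] 0 (PySem.Set.add cs all[i]) (PySem.Set.add done all[i])
              ((first, i + 1) :: rest) (le_refl _)]
          rcases hg : pvGoW all all[i] 0 (PySem.Set.add cs all[i]) (PySem.Set.add done all[i])
            with ⟨p, hp⟩
          have hle2 := pvCnt_mono all (PySem.Set.add done all[i]) p.2 hp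
          have hK2 := Nat.mul_le_mul_right (all.length + 2)
            (Nat.succ_le_of_lt (Nat.lt_of_le_of_lt hle2 hcntlt))
          rw [Nat.succ_mul] at hK2
          -- second IH application: resume the (first, i+1) frame
          rw [ih _ (by
                simp only [pvStackW, pvFrameW, List.map_cons, List.sum_cons] at hle ⊢
                omega)
              all first (i + 1) p.1 p.2 rest (le_refl _)]
        · -- too far: both advance to i+1
          have hm' : pvMh3 first all[i] = false := by simpa using hm
          have hcond : (!(PySem.Set.contains done all[i]) && pvMh3 first all[i]) = false := by
            rw [hm', Bool.and_false]
          rw [pvRunW, dif_pos h, dif_neg (by rw [hcond]; simp), pvGoW, dif_pos h, dif_neg hc,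
            dif_neg hm]
          apply ih _ _ all first (i + 1) cs done rest (le_refl _)
          simp only [pvStackW, pvFrameW, List.map_cons, List.sum_cons] at hle ⊢
          omega
    · -- index exhausted: pop the frame / return the accumulated pair
      rw [pvRunW, dif_neg h, pvGoW, dif_neg h]


lemma pvCnt_le (all done : List (Int × Int × Int × Int)) : pvCnt all done ≤ all.length :=
  List.length_filter_le _ _

lemma pvCnt_pos (all done : List (Int × Int × Int × Int)) (star : Int × Int × Int × Int)
    (hmem : star ∈ all) (hnc : star ∉ done) : 0 < pvCnt all done := by
  unfold pvCnt
  rw [← List.countP_eq_length_filter]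
  refine List.countP_pos_iff.mpr ⟨star, hmem, ?_⟩
  simp [PySem.Set.contains, hnc]

-- the fueled loop of A's port computes the packaged well-founded traversal once the fuel
-- exceeds the number of stars still missing from done
lemma pvLoopA_goW : ∀ (n f : Nat) (all : List (Int × Int × Int × Int))
    (first : Int × Int × Int × Int) (i : Nat) (cs done : List (Int × Int × Int × Int)),
    pvCnt all done ≤ f →
    pvCnt all done * (all.length + 2) + (all.length - i) ≤ n →
    pvLoopA (pvGoAF f all) first (all.drop i) cs done = (pvGoW all first i cs done).val := by
  intro n
  induction n using Nat.strong_induction_on with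
  | _ n ih =>
    intro f all first i cs done hf hle
    by_cases h : i < all.length
    · rw [List.drop_eq_getElem_cons h, pvLoopA]
      by_cases hc : PySem.Set.contains done all[i]
      · rw [if_pos hc, pvGoW, dif_pos h, dif_pos hc]
        exact ih _ (by omega) f all first (i + 1) cs done hf (le_refl _)
      · have hnc : all[i] ∉ done := by
          simpa [PySem.Set.contains, List.contains_iff_mem] using hc
        have hcpos := pvCnt_pos all done all[i] (List.getElem_mem h) hnc
        have hcntlt := pvCnt_add_lt all done all[i] (List.getElem_mem h) hnc
        rw [if_neg hc, pvGoW, dif_pos h, dif_neg hc]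
        by_cases hm : pvMh3 first all[i]
        · rw [if_pos hm, dif_pos hm]
          obtain ⟨f', rfl⟩ : ∃ f', f = f' + 1 := ⟨f - 1, by omega⟩
          have hK := Nat.mul_le_mul_right (all.length + 2) (Nat.succ_le_of_lt hcntlt)
          rw [Nat.succ_mul] at hK
          have h1 : pvGoAF (f' + 1) all all[i]
              (PySem.Set.add cs all[i]) (PySem.Set.add done all[i])
              = (pvGoW all all[i] 0 (PySem.Set.add cs all[i]) (PySem.Set.add done all[i])).val := by
            show pvLoopA (pvGoAF f' all) all[i] all (PySem.Set.add cs all[i])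
                (PySem.Set.add done all[i]) = _
            have hrw := ih _ (by omega) f' all all[i] 0 (PySem.Set.add cs all[i])
              (PySem.Set.add done all[i]) (by omega) (le_refl _)
            rw [List.drop_zero] at hrw
            exact hrw
          simp only [h1]
          rcases hg : pvGoW all all[i] 0 (PySem.Set.add cs all[i]) (PySem.Set.add done all[i])
            with ⟨p, hp⟩
          have hle2 := pvCnt_mono all (PySem.Set.add done all[i]) p.2 hp
          have hK2 := Nat.mul_le_mul_right (all.length + 2) hle2
          exact ih _ (by omega) (f' + 1) all first (i + 1) p.1 p.2 (by omega) (le_refl _)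
        · rw [if_neg hm, dif_neg hm]
          exact ih _ (by omega) f all first (i + 1) cs done hf (le_refl _)
    · rw [List.drop_eq_nil_of_le (by omega), pvLoopA, pvGoW, dif_neg h]

-- the fueled stack machine of B's port computes the well-founded stack machine once the fuel
-- exceeds the machine's measure
lemma pvRunBF_runW : ∀ (f : Nat) (all : List (Int × Int × Int × Int))
    (stack : List ((Int × Int × Int × Int) × Nat)) (cs done : List (Int × Int × Int × Int)),
    pvCnt all done * (all.length + 2) + pvStackW all.length stack < f →
    pvRunBF f all stack cs done = pvRunW all stack cs done := by
  intro f
  induction f with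
  | zero => intro all stack cs done hlt; omega
  | succ f ih =>
    intro all stack cs done hlt
    match stack with
    | [] => rw [pvRunBF, pvRunW]
    | (node, i) :: rest =>
      rw [pvRunBF, pvRunW]
      by_cases h : i < all.length
      · rw [dif_pos h, dif_pos h]
        by_cases hc : (!(PySem.Set.contains done all[i]) && pvMh3 node all[i]) = true
        · rw [if_pos hc, dif_pos hc]
          have hnc : all[i] ∉ done := by
            simpa [PySem.Set.contains, List.contains_iff_mem] using
              ((Bool.and_eq_true _ _).mp hc).1
          have hdec := pvDecB1 (pvCnt all (PySem.Set.add done all[i])) (pvCnt all done)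
            all.length i (pvStackW all.length rest)
            (pvCnt_add_lt all done all[i] (List.getElem_mem h) hnc) h
          apply ih
          simp only [pvStackW, pvFrameW, List.map_cons, List.sum_cons] at hlt ⊢
          omega
        · rw [if_neg hc, dif_neg hc]
          have hdec := pvDecB2 (pvCnt all done) all.length i (pvStackW all.length rest) h
          apply ih
          simp only [pvStackW, pvFrameW, List.map_cons, List.sum_cons] at hlt ⊢
          omega
      · rw [dif_neg h, dif_neg h]
        have hdec := pvDecB3 (pvCnt all done) all.length i (pvStackW all.length rest)
        apply ih
        simp only [pvStackW, pvFrameW, List.map_cons, List.sum_cons] at hlt ⊢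
        omega

-- ===== VERDICT (by name: the statement is the Claim_ definition above) =====
theorem recurse_through_stars_spec : Claim_equal_recurse_through_stars := by
  intro current_set first all_stars done _
  unfold Spec_recurse_through_stars recurse_through_stars recurse_through_stars_alt
  have hA : pvGoAF (all_stars.length + 1) all_stars first current_set done
      = (pvGoW all_stars first 0 current_set done).val := by
    show pvLoopA (pvGoAF all_stars.length all_stars) first all_stars current_set done = _
    have hrw := pvLoopA_goW (pvCnt all_stars done * (all_stars.length + 2) + all_stars.length)
      all_stars.length all_stars first 0 current_set done (pvCnt_le all_stars done) (by omega)
    rw [List.drop_zero] at hrw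
    exact hrw
  have hmul := Nat.mul_le_mul_right (all_stars.length + 2) (pvCnt_le all_stars done)
  have hB : pvRunBF ((all_stars.length + 1) * (all_stars.length + 3)) all_stars
      [(first, 0)] current_set done = pvRunW all_stars [(first, 0)] current_set done := by
    apply pvRunBF_runW
    simp only [pvStackW, pvFrameW, List.map_cons, List.sum_cons, List.map_nil, List.sum_nil]
    have h1 : pvCnt all_stars done * (all_stars.length + 2)
        ≤ all_stars.length * (all_stars.length + 2) :=
      Nat.mul_le_mul_right _ (pvCnt_le all_stars done)
    have h2 : (all_stars.length + 1) * (all_stars.length + 3)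
        = all_stars.length * (all_stars.length + 2) + 2 * all_stars.length + 3 := by ring
    omega
  rw [hA, hB, pvRunW_goW _ all_stars first 0 current_set done [] (le_refl _), pvRunW]
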